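-- pv_equiv track=rewrite | github.com/napetrov/abicheck | abicheck/compat/abicc_dump_import.py | _perl_expr_to_python_literal
-- ===== SOURCE A (Python) =====
-- def _perl_expr_to_python_literal(expr: str) -> str:
--     """Translate a safe Perl-literal subset to Python literal syntax.
--
--     Only performs syntax-token conversion outside single-quoted strings:
--     - ``=>`` -> ``:``
--     - bareword ``undef`` -> ``None``
--     """
--     out: list[str] = []
--     i = 0
--     in_single = False
--     n = len(expr)
--
--     while i < n:
--         ch = expr[i]
--
--         if in_single:
--             out.append(ch)
--             if ch == "\\" and i + 1 < n:
--                 i += 1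
--                 out.append(expr[i])
--             elif ch == "'":
--                 in_single = False
--             i += 1
--             continue
--
--         if ch == "'":
--             in_single = True
--             out.append(ch)
--             i += 1
--             continue
--
--         if ch == "=" and i + 1 < n and expr[i + 1] == ">":
--             out.append(":")
--             i += 2
--             continue
--
--         if expr.startswith("undef", i):
--             prev_ok = i == 0 or not (expr[i - 1].isalnum() or expr[i - 1] == "_")
--             j = i + 5
--             next_ok = j >= n or not (expr[j].isalnum() or expr[j] == "_")
--             if prev_ok and next_ok:
--                 out.append("None")
--                 i = j
--                 continue
--
--         out.append(ch)
--         i += 1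
--
--     return "".join(out)
-- ===== SOURCE B (Python) =====
-- def _lex_parts(expr):
--     """Split expr into ordered (is_string, text) parts; string parts include
--     their quotes (closing quote absent if unterminated) and absorb backslash
--     escapes; code parts are the stretches between strings."""
--     parts = []
--     i, n = 0, len(expr)
--     while i < n:
--         if expr[i] == "'":
--             j = i + 1
--             while j < n and expr[j] != "'":
--                 j += 2 if (expr[j] == "\\" and j + 1 < n) else 1
--             if j < n:
--                 j += 1  # include the closing quote
--             parts.append((True, expr[i:j]))
--         else:
--             j = expr.find("'", i)
--             if j < 0:
--                 j = n
--             parts.append((False, expr[i:j]))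
--         i = j
--     return parts
--
--
-- def _word(c):
--     return c.isalnum() or c == "_"
--
--
-- def _convert_code(code):
--     """Token substitution inside a code stretch: '=>' -> ':', standalone
--     'undef' -> 'None' (alnum/underscore boundaries judged on the code text)."""
--     out = []
--     i, n = 0, len(code)
--     while i < n:
--         if code[i] == "=" and i + 1 < n and code[i + 1] == ">":
--             out.append(":")
--             i += 2
--         elif (code.startswith("undef", i)
--               and (i == 0 or not _word(code[i - 1]))
--               and (i + 5 >= n or not _word(code[i + 5]))):
--             out.append("None")
--             i += 5
--         else:
--             out.append(code[i])
--             i += 1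
--     return "".join(out)
--
--
-- def _perl_expr_to_python_literal(expr: str) -> str:
--     return "".join(text if is_string else _convert_code(text)
--                    for is_string, text in _lex_parts(expr))
-- ===== Notes on version B (the rewrite author's own statement) =====
-- stated objective: alternative
-- what changed: Replaces A's single stateful while-loop (in_single flag interleaving string tracking with token substitution) by a two-pass decomposition: a lexer that splits the input into tagged string/code parts, then a substitution pass applied only to code parts, joined back in order.
import Mathlib
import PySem

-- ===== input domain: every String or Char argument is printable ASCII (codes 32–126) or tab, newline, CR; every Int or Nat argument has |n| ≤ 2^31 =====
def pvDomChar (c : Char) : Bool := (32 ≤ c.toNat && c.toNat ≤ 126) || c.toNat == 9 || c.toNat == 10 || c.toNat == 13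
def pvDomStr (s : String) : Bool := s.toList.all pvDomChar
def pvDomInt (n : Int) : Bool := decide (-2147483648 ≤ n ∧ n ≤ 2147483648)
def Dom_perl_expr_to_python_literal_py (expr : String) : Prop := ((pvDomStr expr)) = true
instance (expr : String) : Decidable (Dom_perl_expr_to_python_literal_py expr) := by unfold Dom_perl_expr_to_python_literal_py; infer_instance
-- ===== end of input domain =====

-- B replaces A's single stateful scan (in_single flag) by a two-pass decomposition:
-- lex into tagged string/code parts, substitute tokens only in code parts, join.

-- shared character predicates (Python's c.isalnum() or c == '_'; exact on ASCII)
def pvWordChar (c : Char) : Bool := c.isAlphanum || c == '_'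
def pvPrevOk : Option Char → Bool
  | none => true
  | some c => !pvWordChar c
def pvNextOk : List Char → Bool
  | [] => true
  | c :: _ => !pvWordChar c
def pvUndef : List Char := ['u', 'n', 'd', 'e', 'f']

-- ===== PORT A =====
-- A's while-loop: recursion over the remaining characters, carrying the
-- in_single flag and the previous character (A's expr[i-1]).
def perlA : List Char → Bool → Option Char → List Char
  | [], _, _ => []
  | c :: rest, true, _ =>
      if c = '\\' then
        match rest with
        | d :: rest2 => c :: d :: perlA rest2 true (some d)
        | [] => c :: perlA [] true (some c)
      else if c = '\'' then c :: perlA rest false (some c)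
      else c :: perlA rest true (some c)
  | c :: rest, false, prev =>
      if c = '\'' then c :: perlA rest true (some c)
      else if c = '=' && rest.head? == some '>' then ':' :: perlA rest.tail false (some '>')
      else if (c :: rest).take 5 == pvUndef && pvPrevOk prev && pvNextOk ((c :: rest).drop 5) then
        'N' :: 'o' :: 'n' :: 'e' :: perlA ((c :: rest).drop 5) false (some 'f')
      else c :: perlA rest false (some c)
termination_by l _ _ => l.length
decreasing_by all_goals simp_all [List.length_drop]

def perl_expr_to_python_literal_py (expr : String) : String :=
  String.ofList (perlA expr.toList false none)

-- ===== PORT B =====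
-- Source B's inner string loop: chars after an opening quote ↦ (string text incl.
-- closing quote if terminated, remainder of the input).
def pvLexStr : List Char → List Char × List Char
  | [] => ([], [])
  | c :: rest =>
      if c = '\'' then ([c], rest)
      else if c = '\\' then
        match rest with
        | [] => ([c], [])
        | d :: rest2 => (c :: d :: (pvLexStr rest2).1, (pvLexStr rest2).2)
      else (c :: (pvLexStr rest).1, (pvLexStr rest).2)

theorem pvLexStr_snd_le (l : List Char) : (pvLexStr l).2.length ≤ l.length := by
  fun_induction pvLexStr l <;> simp_all <;> omega

-- Source B's _lex_parts
def pvLexParts : List Char → List (Bool × List Char)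
  | [] => []
  | c :: rest =>
      if c = '\'' then
        (true, c :: (pvLexStr rest).1) :: pvLexParts (pvLexStr rest).2
      else
        (false, (c :: rest).takeWhile (fun x => !(x == '\''))) ::
          pvLexParts ((c :: rest).dropWhile (fun x => !(x == '\'')))
termination_by l => l.length
decreasing_by
  · have := pvLexStr_snd_le rest; simp; omega
  · rename_i h
    have h1 : (!(c == '\'')) = true := by simp_all
    rw [List.dropWhile_cons, if_pos h1]
    have := List.length_dropWhile_le (fun x => !(x == '\'')) rest
    simp; omega

-- Source B's _convert_code: recursion over the code part, carrying the previous
-- character (code[i-1]; none at the start of the part).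
def pvSubst : Option Char → List Char → List Char
  | _, [] => []
  | prev, c :: rest =>
      if c = '=' && rest.head? == some '>' then ':' :: pvSubst (some '>') rest.tail
      else if (c :: rest).take 5 == pvUndef && pvPrevOk prev && pvNextOk ((c :: rest).drop 5) then
        'N' :: 'o' :: 'n' :: 'e' :: pvSubst (some 'f') ((c :: rest).drop 5)
      else c :: pvSubst (some c) rest
termination_by _ l => l.length
decreasing_by all_goals simp_all [List.length_drop]

-- Source B's final join
def pvJoinParts : List (Bool × List Char) → List Char
  | [] => []
  | (isStr, t) :: rest => (if isStr then t else pvSubst none t) ++ pvJoinParts rest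

def perl_expr_to_python_literal_py_alt (expr : String) : String :=
  String.ofList (pvJoinParts (pvLexParts expr.toList))

-- ===== PRECONDITION & SPEC =====
def Spec_perl_expr_to_python_literal_py (expr : String) (out : String) : Prop := out = perl_expr_to_python_literal_py_alt expr
instance (expr : String) (out : String) : Decidable (Spec_perl_expr_to_python_literal_py expr out) := by unfold Spec_perl_expr_to_python_literal_py; infer_instance

-- ===== CLAIM (what is proved, stated in full; the proofs are below) =====
def Claim_equal_perl_expr_to_python_literal_py : Prop := ∀ (expr : String), Dom_perl_expr_to_python_literal_py expr → Spec_perl_expr_to_python_literal_py expr (perl_expr_to_python_literal_py expr)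

-- ===== LEMMAS AND PROOFS =====

-- A inside a single-quoted string = B's string lexer followed by A after it.
theorem perlA_string (l : List Char) :
    ∀ p, perlA l true p = (pvLexStr l).1 ++ perlA (pvLexStr l).2 false (some '\'') := by
  fun_induction pvLexStr l <;> intro p <;> rw [perlA.eq_def] <;> simp_all [perlA]

-- pvSubst only looks at pvPrevOk of its carried previous character.
theorem pvSubst_congr (p q : Option Char) (l : List Char) (h : pvPrevOk p = pvPrevOk q) :
    pvSubst p l = pvSubst q l := by
  cases l with
  | nil => simp [pvSubst]
  | cons c rest => simp only [pvSubst, h]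

-- unfolding lemmas for the top-level (in_single = false) step of each scan
theorem perlA_cons_false (c : Char) (rest : List Char) (p : Option Char) :
    perlA (c :: rest) false p =
      if c = '\'' then c :: perlA rest true (some c)
      else if c = '=' && rest.head? == some '>' then ':' :: perlA rest.tail false (some '>')
      else if (c :: rest).take 5 == pvUndef && pvPrevOk p && pvNextOk ((c :: rest).drop 5) then
        'N' :: 'o' :: 'n' :: 'e' :: perlA ((c :: rest).drop 5) false (some 'f')
      else c :: perlA rest false (some c) := by
  conv_lhs => rw [perlA.eq_def]

theorem pvSubst_cons (c : Char) (rest : List Char) (p : Option Char) :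
    pvSubst p (c :: rest) =
      if c = '=' && rest.head? == some '>' then ':' :: pvSubst (some '>') rest.tail
      else if (c :: rest).take 5 == pvUndef && pvPrevOk p && pvNextOk ((c :: rest).drop 5) then
        'N' :: 'o' :: 'n' :: 'e' :: pvSubst (some 'f') ((c :: rest).drop 5)
      else c :: pvSubst (some c) rest := by
  conv_lhs => rw [pvSubst.eq_def]

theorem pvLexParts_cons (c : Char) (rest : List Char) :
    pvLexParts (c :: rest) =
      if c = '\'' then (true, c :: (pvLexStr rest).1) :: pvLexParts (pvLexStr rest).2
      else (false, (c :: rest).takeWhile (fun x => !(x == '\''))) ::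
        pvLexParts ((c :: rest).dropWhile (fun x => !(x == '\''))) := by
  conv_lhs => rw [pvLexParts.eq_def]

-- on an empty remainder or one starting with a quote, A's previous character is irrelevant
theorem perlA_quote_prev (rest : List Char) (p q : Option Char)
    (hr : rest = [] ∨ rest.head? = some '\'') :
    perlA rest false p = perlA rest false q := by
  rcases hr with rfl | hh
  · simp [perlA]
  · cases rest with
    | nil => simp [perlA]
    | cons c r2 =>
      simp at hh
      subst hh
      rw [perlA_cons_false, perlA_cons_false]
      simp

-- the undef test never looks past the end of the code stretch
theorem undef_cond_eq (code rest : List Char) (p : Option Char)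
    (hr : rest = [] ∨ rest.head? = some '\'') :
    ((code ++ rest).take 5 == pvUndef && pvPrevOk p && pvNextOk ((code ++ rest).drop 5))
      = (code.take 5 == pvUndef && pvPrevOk p && pvNextOk (code.drop 5)) := by
  rcases hr with rfl | hh
  · simp
  · cases rest with
    | nil => simp at hh
    | cons r r2 =>
      simp at hh
      subst hh
      by_cases h5 : 5 ≤ code.length
      · rw [List.take_append_of_le_length h5, List.drop_append_of_le_length h5]
        cases hd : code.drop 5 with
        | nil => simp [pvNextOk, pvWordChar]
        | cons d t => simp [pvNextOk]
      · have hlt : code.length < 5 := Nat.lt_of_not_le h5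
        have hB : (code.take 5 == pvUndef) = false := by
          have : code.take 5 = code := List.take_of_length_le (Nat.le_of_lt hlt)
          rw [this]
          apply beq_eq_false_iff_ne.mpr
          intro hcon
          rw [hcon] at hlt
          simp [pvUndef] at hlt
        have hA : ((code ++ '\'' :: r2).take 5 == pvUndef) = false := by
          apply beq_eq_false_iff_ne.mpr
          intro hcon
          have hmem : '\'' ∈ (code ++ '\'' :: r2).take 5 := by
            rw [List.take_append]
            refine List.mem_append_right _ ?_
            have h1 : 1 ≤ 5 - code.length := by omega
            cases he : ('\'' :: r2).take (5 - code.length) with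
            | nil => simp at he; omega
            | cons x xs =>
              have : x = '\'' := by
                cases hk : 5 - code.length with
                | zero => omega
                | succ k => rw [hk] at he; simp at he; exact he.1.symm
              simp [this]
          rw [hcon] at hmem
          simp [pvUndef] at hmem
        rw [hA, hB]
        simp

-- A over a quote-free code stretch followed by rest (empty or starting with a
-- quote) = B's substitution of the stretch followed by A on rest.
theorem perlA_code (n : Nat) :
    ∀ (code rest : List Char) (p : Option Char), code.length ≤ n →
    (∀ c ∈ code, c ≠ '\'') → (rest = [] ∨ rest.head? = some '\'') →
    perlA (code ++ rest) false p = pvSubst p code ++ perlA rest false (some '\'') := by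
  induction n with
  | zero =>
    intro code rest p hlen hq hr
    have hc : code = [] := List.eq_nil_of_length_eq_zero (Nat.le_zero.mp hlen)
    subst hc
    simpa [pvSubst] using perlA_quote_prev rest p (some '\'') hr
  | succ n ih =>
    intro code rest p hlen hq hr
    cases code with
    | nil => simpa [pvSubst] using perlA_quote_prev rest p (some '\'') hr
    | cons c code' =>
      have hcq : c ≠ '\'' := hq c (by simp)
      have hq' : ∀ x ∈ code', x ≠ '\'' := fun x hx => hq x (by simp [hx])
      have hassoc : (c :: code') ++ rest = c :: (code' ++ rest) := rfl
      rw [hassoc, perlA_cons_false, pvSubst_cons, if_neg hcq]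
      have h2 : ((code' ++ rest).head? == some '>') = (code'.head? == some '>') := by
        cases code' with
        | nil =>
          rcases hr with rfl | hh
          · simp
          · cases rest with
            | nil => simp at hh
            | cons r r2 => simp at hh; subst hh; simp
        | cons d code'' => simp
      have h3 : ((c :: (code' ++ rest)).take 5 == pvUndef && pvPrevOk p
                   && pvNextOk ((c :: (code' ++ rest)).drop 5))
              = ((c :: code').take 5 == pvUndef && pvPrevOk p && pvNextOk ((c :: code').drop 5)) :=
        undef_cond_eq (c :: code') rest p hr
      rw [h2, h3]
      split_ifs with hcond2 hcond3
      · -- '=>' branch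
        simp only [Bool.and_eq_true, beq_iff_eq, decide_eq_true_eq] at hcond2
        obtain ⟨hce, hhd⟩ := hcond2
        cases code' with
        | nil => simp at hhd
        | cons d code'' =>
          simp at hhd
          subst hhd
          have := ih code'' rest (some '>') (by simp at hlen ⊢; omega) (fun x hx => hq' x (by simp [hx])) hr
          simp [this]
      · -- undef branch
        simp only [Bool.and_eq_true, beq_iff_eq] at hcond3
        have h5 : 5 ≤ (c :: code').length := by
          have := congrArg List.length hcond3.1.1
          simp [pvUndef] at this
          simp
          omega
        have hdrop : (c :: (code' ++ rest)).drop 5 = (c :: code').drop 5 ++ rest := by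
          rw [← hassoc, List.drop_append_of_le_length h5]
        rw [hdrop]
        have := ih ((c :: code').drop 5) rest (some 'f')
          (by simp at hlen ⊢; omega)
          (fun x hx => hq x (List.mem_of_mem_drop hx)) hr
        simp only [List.drop_succ_cons] at this
        simp [this]
      · -- default branch
        have := ih code' rest (some c) (by simp at hlen; omega) hq' hr
        simp [this]

theorem perlA_eq_parts (n : Nat) :
    ∀ (l : List Char) (p : Option Char), l.length ≤ n → pvPrevOk p = true →
    perlA l false p = pvJoinParts (pvLexParts l) := by
  induction n with
  | zero =>
    intro l p hlen _
    have : l = [] := List.eq_nil_of_length_eq_zero (Nat.le_zero.mp hlen)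
    subst this
    simp [perlA, pvLexParts, pvJoinParts]
  | succ n ih =>
    intro l p hlen hp
    cases l with
    | nil => simp [perlA, pvLexParts, pvJoinParts]
    | cons c rest =>
      by_cases hc : c = '\''
      · subst hc
        rw [perlA_cons_false, if_pos rfl, perlA_string rest (some '\'')]
        have hlen2 : (pvLexStr rest).2.length ≤ n := by
          have := pvLexStr_snd_le rest
          simp at hlen
          omega
        rw [ih (pvLexStr rest).2 (some '\'') hlen2 (by decide)]
        rw [pvLexParts_cons, if_pos rfl]
        simp [pvJoinParts]
      · have hsplit : (c :: rest).takeWhile (fun x => !(x == '\''))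
            ++ (c :: rest).dropWhile (fun x => !(x == '\'')) = c :: rest :=
          List.takeWhile_append_dropWhile
        have hqf : ∀ x ∈ (c :: rest).takeWhile (fun x => !(x == '\'')), x ≠ '\'' := by
          intro x hx
          have := List.mem_takeWhile_imp hx
          simpa using this
        have hrr : (c :: rest).dropWhile (fun x => !(x == '\'')) = [] ∨
            ((c :: rest).dropWhile (fun x => !(x == '\''))).head? = some '\'' := by
          cases hru : (c :: rest).dropWhile (fun x => !(x == '\'')) with
          | nil => exact Or.inl rfl
          | cons d r2 =>
            right
            have hd := List.head?_dropWhile_not (fun x => !(x == '\'')) (c :: rest)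
            rw [hru] at hd
            simp at hd
            simp [hd]
        have hdlen : ((c :: rest).dropWhile (fun x => !(x == '\''))).length ≤ n := by
          have h1 : (c :: rest).dropWhile (fun x => !(x == '\'')) = rest.dropWhile (fun x => !(x == '\'')) := by
            rw [List.dropWhile_cons, if_pos (by simp [hc])]
          rw [h1]
          have := List.length_dropWhile_le (fun x => !(x == '\'')) rest
          simp at hlen
          omega
        conv_lhs => rw [← hsplit]
        rw [perlA_code ((c :: rest).takeWhile (fun x => !(x == '\''))).length _ _ p le_rfl hqf hrr]
        rw [pvSubst_congr p none _ hp]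
        rcases hrr with hre | hrh
        · rw [hre]
          rw [pvLexParts_cons, if_neg hc, hre]
          simp [perlA, pvJoinParts, pvLexParts]
        · cases hru : (c :: rest).dropWhile (fun x => !(x == '\'')) with
          | nil => rw [hru] at hrh; simp at hrh
          | cons d r2 =>
            rw [hru] at hrh
            simp at hrh
            subst hrh
            rw [hru] at hdlen
            rw [perlA_cons_false, if_pos rfl, perlA_string r2 (some '\'')]
            have hlen3 : (pvLexStr r2).2.length ≤ n := by
              have := pvLexStr_snd_le r2
              simp at hdlen
              omega
            rw [ih (pvLexStr r2).2 (some '\'') hlen3 (by decide)]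
            rw [pvLexParts_cons, if_neg hc, hru, pvLexParts_cons, if_pos rfl]
            simp [pvJoinParts]

-- ===== VERDICT (by name: the statement is the Claim_ definition above) =====
theorem perl_expr_to_python_literal_py_spec : Claim_equal_perl_expr_to_python_literal_py := by
  intro expr _
  unfold Spec_perl_expr_to_python_literal_py perl_expr_to_python_literal_py perl_expr_to_python_literal_py_alt
  rw [perlA_eq_parts expr.toList.length expr.toList none le_rfl rfl]
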